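-- pv_equiv track=rewrite | github.com/ayzekinus/napi | backend/apps/core/services.py | parse_legacy_permissions
-- ===== SOURCE A (Python) =====
-- def parse_legacy_permissions(raw_permissions: str | None) -> dict[str, bool]:
--     tokens = {x.strip() for x in (raw_permissions or '').split(',') if x.strip()}
--     return {
--         'anakod_list': 'A0' in tokens,
--         'anakod_write': 'A1' in tokens or 'A2' in tokens,
--         'buluntu_list': 'B0' in tokens,
--         'buluntu_write': 'B1' in tokens or 'B2' in tokens,
--         'acma_rapor_list': 'AR0' in tokens,
--         'acma_rapor_write': 'AR1' in tokens or 'AR2' in tokens,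
--         'evrak_list': 'EY0' in tokens,
--         'evrak_write': 'EY1' in tokens or 'EY2' in tokens,
--         'demirbas_list': 'DL0' in tokens,
--         'demirbas_write': 'DL1' in tokens or 'DL2' in tokens,
--         'kullanicilar_list': 'R0' in tokens,
--         'kullanicilar_write': 'R1' in tokens or 'R2' in tokens,
--     }
-- ===== SOURCE B (Python) =====
-- # B inverts the direction: instead of 12 membership tests against a token set,
-- # one pass over the input tokens marks flags via a token->flag GRANTS map.
-- GRANTS = {
--     'A0': 'anakod_list', 'A1': 'anakod_write', 'A2': 'anakod_write',
--     'B0': 'buluntu_list', 'B1': 'buluntu_write', 'B2': 'buluntu_write',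
--     'AR0': 'acma_rapor_list', 'AR1': 'acma_rapor_write', 'AR2': 'acma_rapor_write',
--     'EY0': 'evrak_list', 'EY1': 'evrak_write', 'EY2': 'evrak_write',
--     'DL0': 'demirbas_list', 'DL1': 'demirbas_write', 'DL2': 'demirbas_write',
--     'R0': 'kullanicilar_list', 'R1': 'kullanicilar_write', 'R2': 'kullanicilar_write',
-- }
--
-- FLAG_KEYS = ('anakod_list', 'anakod_write', 'buluntu_list', 'buluntu_write',
--              'acma_rapor_list', 'acma_rapor_write', 'evrak_list', 'evrak_write',
--              'demirbas_list', 'demirbas_write', 'kullanicilar_list', 'kullanicilar_write')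
--
--
-- def parse_legacy_permissions(raw_permissions):
--     flags = dict.fromkeys(FLAG_KEYS, False)
--     for part in (raw_permissions or '').split(','):
--         key = GRANTS.get(part.strip())
--         if key is not None:
--             flags[key] = True
--     return flags
-- ===== Notes on version B (the rewrite author's own statement) =====
-- stated objective: alternative
-- what changed: Inverts the traversal direction: instead of building a token set and testing 12 fixed memberships against it, B initialises an all-false flags dict and makes one pass over the input tokens, marking the flag named by a token->flag GRANTS map for each token it recognises.
import Mathlib
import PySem

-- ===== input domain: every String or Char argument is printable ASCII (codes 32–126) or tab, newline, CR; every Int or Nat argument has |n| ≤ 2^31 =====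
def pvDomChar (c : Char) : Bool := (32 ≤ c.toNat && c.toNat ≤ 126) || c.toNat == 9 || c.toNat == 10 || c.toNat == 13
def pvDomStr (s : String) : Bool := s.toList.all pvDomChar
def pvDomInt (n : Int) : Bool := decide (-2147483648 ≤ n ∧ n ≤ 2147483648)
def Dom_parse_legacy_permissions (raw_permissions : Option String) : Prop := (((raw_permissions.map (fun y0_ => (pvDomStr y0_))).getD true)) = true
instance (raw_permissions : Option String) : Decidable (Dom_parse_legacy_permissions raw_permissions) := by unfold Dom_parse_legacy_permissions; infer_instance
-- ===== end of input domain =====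

-- B inverts the traversal: one pass over the input tokens marks flags via a token->flag GRANTS map,
-- instead of building a token set and testing 12 fixed memberships against it (objective: alternative decomposition, same cost).
-- ===== PORT A =====
def parse_legacy_permissions (raw_permissions : Option String) : List (String × Bool) :=
  let tokens : PySem.Set String := PySem.Set.ofList
    (((PySem.Str.split? (raw_permissions.getD "") ",").getD []).filterMap
      (fun x => let t := PySem.Str.strip x; if t = "" then none else some t))
  [("anakod_list", PySem.Set.contains tokens "A0"),
   ("anakod_write", PySem.Set.contains tokens "A1" || PySem.Set.contains tokens "A2"),
   ("buluntu_list", PySem.Set.contains tokens "B0"),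
   ("buluntu_write", PySem.Set.contains tokens "B1" || PySem.Set.contains tokens "B2"),
   ("acma_rapor_list", PySem.Set.contains tokens "AR0"),
   ("acma_rapor_write", PySem.Set.contains tokens "AR1" || PySem.Set.contains tokens "AR2"),
   ("evrak_list", PySem.Set.contains tokens "EY0"),
   ("evrak_write", PySem.Set.contains tokens "EY1" || PySem.Set.contains tokens "EY2"),
   ("demirbas_list", PySem.Set.contains tokens "DL0"),
   ("demirbas_write", PySem.Set.contains tokens "DL1" || PySem.Set.contains tokens "DL2"),
   ("kullanicilar_list", PySem.Set.contains tokens "R0"),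
   ("kullanicilar_write", PySem.Set.contains tokens "R1" || PySem.Set.contains tokens "R2")]

-- ===== PORT B =====
-- GRANTS: Python dict literal (distinct keys) ported as the insertion-ordered association list
def pvGrants : PySem.Dict String String := PySem.Dict.mk
  [("A0", "anakod_list"), ("A1", "anakod_write"), ("A2", "anakod_write"),
   ("B0", "buluntu_list"), ("B1", "buluntu_write"), ("B2", "buluntu_write"),
   ("AR0", "acma_rapor_list"), ("AR1", "acma_rapor_write"), ("AR2", "acma_rapor_write"),
   ("EY0", "evrak_list"), ("EY1", "evrak_write"), ("EY2", "evrak_write"),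
   ("DL0", "demirbas_list"), ("DL1", "demirbas_write"), ("DL2", "demirbas_write"),
   ("R0", "kullanicilar_list"), ("R1", "kullanicilar_write"), ("R2", "kullanicilar_write")]

def pvFlagKeys : List String :=
  ["anakod_list", "anakod_write", "buluntu_list", "buluntu_write",
   "acma_rapor_list", "acma_rapor_write", "evrak_list", "evrak_write",
   "demirbas_list", "demirbas_write", "kullanicilar_list", "kullanicilar_write"]

def parse_legacy_permissions_alt (raw_permissions : Option String) : List (String × Bool) :=
  -- flags = dict.fromkeys(FLAG_KEYS, False)  (distinct keys: the ordered association list)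
  -- for part in (raw_permissions or '').split(','): key = GRANTS.get(part.strip()); if key is not None: flags[key] = True
  (((PySem.Str.split? (raw_permissions.getD "") ",").getD []).foldl
    (fun flags part =>
      match PySem.Dict.get? pvGrants (PySem.Str.strip part) with
      | some key => PySem.Dict.insert flags key true
      | none => flags)
    (PySem.Dict.mk (pvFlagKeys.map (fun k => (k, false))))).items

-- ===== PRECONDITION & SPEC =====
def Spec_parse_legacy_permissions (raw_permissions : Option String) (out : List (String × Bool)) : Prop := out = parse_legacy_permissions_alt raw_permissions
instance (raw_permissions : Option String) (out : List (String × Bool)) : Decidable (Spec_parse_legacy_permissions raw_permissions out) := by unfold Spec_parse_legacy_permissions; infer_instance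

-- ===== CLAIM (what is proved, stated in full; the proofs are below) =====
def Claim_equal_parse_legacy_permissions : Prop := ∀ (raw_permissions : Option String), Dom_parse_legacy_permissions raw_permissions → Spec_parse_legacy_permissions raw_permissions (parse_legacy_permissions raw_permissions)

-- ===== LEMMAS AND PROOFS =====

-- pvHit tok ps: some part of ps strips to tok
def pvHit (tok : String) (ps : List String) : Bool := ps.any (fun x => PySem.Str.strip x == tok)

-- A's token-set membership equals pvHit (for the nonempty literal tokens A tests)
lemma pv_contains_tokens_eq_pvHit (tok : String) (htok : tok ≠ "") (ps : List String) :
    PySem.Set.contains (PySem.Set.ofList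
      (ps.filterMap (fun x => let t := PySem.Str.strip x; if t = "" then none else some t))) tok
      = pvHit tok ps := by
  rw [Bool.eq_iff_iff]
  simp only [PySem.Set.contains, List.contains_iff_mem, PySem.Set.mem_ofList,
    List.mem_filterMap, pvHit, List.any_eq_true, beq_iff_eq]
  constructor
  · rintro ⟨x, hx, hfx⟩
    split at hfx
    · exact absurd hfx (by simp)
    · exact ⟨x, hx, by simpa using hfx⟩
  · rintro ⟨x, hx, hfx⟩
    refine ⟨x, hx, ?_⟩
    rw [if_neg (by simp [hfx, htok]), hfx]

-- B's loop step
def pvStep (flags : PySem.Dict String Bool) (part : String) : PySem.Dict String Bool :=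
  match PySem.Dict.get? pvGrants (PySem.Str.strip part) with
  | some key => PySem.Dict.insert flags key true
  | none => flags

lemma pvAlt_eq_foldl_pvStep (raw : Option String) :
    parse_legacy_permissions_alt raw =
      (((PySem.Str.split? (raw.getD "") ",").getD []).foldl pvStep
        (PySem.Dict.mk (pvFlagKeys.map (fun k => (k, false))))).items := rfl

-- the loop never adds a key: every key it inserts is already present
lemma pvLoop_keys (ps : List String) (d : PySem.Dict String Bool)
    (h : ∀ k ∈ pvGrants.values, k ∈ d.keys) :
    (ps.foldl pvStep d).keys = d.keys := by
  induction ps generalizing d with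
  | nil => rfl
  | cons x ps ih =>
    simp only [List.foldl_cons, pvStep]
    rcases hg : PySem.Dict.get? pvGrants (PySem.Str.strip x) with _ | key
    · exact ih d h
    · have hkv : key ∈ pvGrants.values :=
        List.mem_map_of_mem (PySem.Dict.mem_items_of_get?_eq_some pvGrants hg)
      have hcont : d.contains key = true :=
        (PySem.Dict.contains_iff_mem_keys d key).mpr (h key hkv)
      have hkeys : (d.insert key true).keys = d.keys :=
        PySem.Dict.keys_insert_of_contains d true hcont
      rw [ih _ (fun k hk => hkeys ▸ h k hk), hkeys]

-- per-key value of the loop: the old flag or some part maps to this key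
lemma pvLoop_getD (ps : List String) (d : PySem.Dict String Bool) (k : String) :
    (ps.foldl pvStep d).getD k false
      = (d.getD k false || ps.any (fun x => PySem.Dict.get? pvGrants (PySem.Str.strip x) == some k)) := by
  induction ps generalizing d with
  | nil => simp
  | cons x ps ih =>
    simp only [List.foldl_cons, List.any_cons, pvStep]
    rcases hg : PySem.Dict.get? pvGrants (PySem.Str.strip x) with _ | key
    · simp [ih]
    · rw [ih, PySem.Dict.getD_insert]
      by_cases hk : k = key
      · subst hk; simp
      · have hkk : (key == k) = false := by simpa using Ne.symm hk
        simp [hkk, hk]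

-- characterizations of GRANTS lookups, one per flag
lemma pv_gr_1 : ∀ t, PySem.Dict.get? pvGrants t = some "anakod_list" ↔ t = "A0" := by
  intro t
  rw [PySem.Dict.get?_eq_some_iff_mem_items pvGrants t _ (by decide)]
  simp [pvGrants, Prod.mk.injEq]
lemma pv_gr_2 : ∀ t, PySem.Dict.get? pvGrants t = some "anakod_write" ↔ (t = "A1" ∨ t = "A2") := by
  intro t
  rw [PySem.Dict.get?_eq_some_iff_mem_items pvGrants t _ (by decide)]
  simp [pvGrants, Prod.mk.injEq]
lemma pv_gr_3 : ∀ t, PySem.Dict.get? pvGrants t = some "buluntu_list" ↔ t = "B0" := by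
  intro t
  rw [PySem.Dict.get?_eq_some_iff_mem_items pvGrants t _ (by decide)]
  simp [pvGrants, Prod.mk.injEq]
lemma pv_gr_4 : ∀ t, PySem.Dict.get? pvGrants t = some "buluntu_write" ↔ (t = "B1" ∨ t = "B2") := by
  intro t
  rw [PySem.Dict.get?_eq_some_iff_mem_items pvGrants t _ (by decide)]
  simp [pvGrants, Prod.mk.injEq]
lemma pv_gr_5 : ∀ t, PySem.Dict.get? pvGrants t = some "acma_rapor_list" ↔ t = "AR0" := by
  intro t
  rw [PySem.Dict.get?_eq_some_iff_mem_items pvGrants t _ (by decide)]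
  simp [pvGrants, Prod.mk.injEq]
lemma pv_gr_6 : ∀ t, PySem.Dict.get? pvGrants t = some "acma_rapor_write" ↔ (t = "AR1" ∨ t = "AR2") := by
  intro t
  rw [PySem.Dict.get?_eq_some_iff_mem_items pvGrants t _ (by decide)]
  simp [pvGrants, Prod.mk.injEq]
lemma pv_gr_7 : ∀ t, PySem.Dict.get? pvGrants t = some "evrak_list" ↔ t = "EY0" := by
  intro t
  rw [PySem.Dict.get?_eq_some_iff_mem_items pvGrants t _ (by decide)]
  simp [pvGrants, Prod.mk.injEq]
lemma pv_gr_8 : ∀ t, PySem.Dict.get? pvGrants t = some "evrak_write" ↔ (t = "EY1" ∨ t = "EY2") := by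
  intro t
  rw [PySem.Dict.get?_eq_some_iff_mem_items pvGrants t _ (by decide)]
  simp [pvGrants, Prod.mk.injEq]
lemma pv_gr_9 : ∀ t, PySem.Dict.get? pvGrants t = some "demirbas_list" ↔ t = "DL0" := by
  intro t
  rw [PySem.Dict.get?_eq_some_iff_mem_items pvGrants t _ (by decide)]
  simp [pvGrants, Prod.mk.injEq]
lemma pv_gr_10 : ∀ t, PySem.Dict.get? pvGrants t = some "demirbas_write" ↔ (t = "DL1" ∨ t = "DL2") := by
  intro t
  rw [PySem.Dict.get?_eq_some_iff_mem_items pvGrants t _ (by decide)]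
  simp [pvGrants, Prod.mk.injEq]
lemma pv_gr_11 : ∀ t, PySem.Dict.get? pvGrants t = some "kullanicilar_list" ↔ t = "R0" := by
  intro t
  rw [PySem.Dict.get?_eq_some_iff_mem_items pvGrants t _ (by decide)]
  simp [pvGrants, Prod.mk.injEq]
lemma pv_gr_12 : ∀ t, PySem.Dict.get? pvGrants t = some "kullanicilar_write" ↔ (t = "R1" ∨ t = "R2") := by
  intro t
  rw [PySem.Dict.get?_eq_some_iff_mem_items pvGrants t _ (by decide)]
  simp [pvGrants, Prod.mk.injEq]

-- converting the loop's per-key any into pvHit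
lemma pv_any_grant_one (ps : List String) (k a : String)
    (h : ∀ t, PySem.Dict.get? pvGrants t = some k ↔ t = a) :
    ps.any (fun x => PySem.Dict.get? pvGrants (PySem.Str.strip x) == some k) = pvHit a ps := by
  rw [Bool.eq_iff_iff]
  simp only [pvHit, List.any_eq_true, beq_iff_eq, h]

lemma pv_any_grant_two (ps : List String) (k a b : String)
    (h : ∀ t, PySem.Dict.get? pvGrants t = some k ↔ (t = a ∨ t = b)) :
    ps.any (fun x => PySem.Dict.get? pvGrants (PySem.Str.strip x) == some k)
      = (pvHit a ps || pvHit b ps) := by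
  rw [Bool.eq_iff_iff]
  simp only [pvHit, List.any_eq_true, beq_iff_eq, Bool.or_eq_true, h]
  constructor
  · rintro ⟨x, hx, (hc | hc)⟩
    · exact Or.inl ⟨x, hx, hc⟩
    · exact Or.inr ⟨x, hx, hc⟩
  · rintro (⟨x, hx, hc⟩ | ⟨x, hx, hc⟩)
    · exact ⟨x, hx, Or.inl hc⟩
    · exact ⟨x, hx, Or.inr hc⟩

lemma pv_getD_mk_false (L : List String) (k : String) :
    (PySem.Dict.mk (L.map (fun k => (k, false)))).getD k false = false := by
  induction L with
  | nil => rfl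
  | cons a L ih =>
    by_cases h : (a == k) = true
    · simp [PySem.Dict.getD_eq_get?_getD, PySem.Dict.get?_mk_cons, h]
    · simp only [List.map_cons]
      rw [PySem.Dict.getD_eq_get?_getD, PySem.Dict.get?_mk_cons, if_neg h,
        ← PySem.Dict.getD_eq_get?_getD]
      exact ih

-- ===== VERDICT (by name: the statement is the Claim_ definition above) =====
theorem parse_legacy_permissions_spec : Claim_equal_parse_legacy_permissions := by
  intro raw _
  unfold Spec_parse_legacy_permissions
  rw [pvAlt_eq_foldl_pvStep]
  set ps : List String := (PySem.Str.split? (raw.getD "") ",").getD [] with hps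
  set d0 : PySem.Dict String Bool := PySem.Dict.mk (pvFlagKeys.map (fun k => (k, false))) with hd0
  have hkeys : (ps.foldl pvStep d0).keys = pvFlagKeys := by
    rw [pvLoop_keys ps d0 (by decide)]; decide
  have hnd : (ps.foldl pvStep d0).keys.Nodup := by rw [hkeys]; decide
  rw [PySem.Dict.items_eq_map_keys _ hnd false, hkeys]
  simp only [pvFlagKeys, List.map_cons, List.map_nil, pvLoop_getD,
    pv_any_grant_one ps _ _ pv_gr_1, pv_any_grant_two ps _ _ _ pv_gr_2,
    pv_any_grant_one ps _ _ pv_gr_3, pv_any_grant_two ps _ _ _ pv_gr_4,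
    pv_any_grant_one ps _ _ pv_gr_5, pv_any_grant_two ps _ _ _ pv_gr_6,
    pv_any_grant_one ps _ _ pv_gr_7, pv_any_grant_two ps _ _ _ pv_gr_8,
    pv_any_grant_one ps _ _ pv_gr_9, pv_any_grant_two ps _ _ _ pv_gr_10,
    pv_any_grant_one ps _ _ pv_gr_11, pv_any_grant_two ps _ _ _ pv_gr_12]
  unfold parse_legacy_permissions
  simp only [← hps]
  rw [pv_contains_tokens_eq_pvHit "A0" (by decide) ps, pv_contains_tokens_eq_pvHit "A1" (by decide) ps,
      pv_contains_tokens_eq_pvHit "A2" (by decide) ps, pv_contains_tokens_eq_pvHit "B0" (by decide) ps,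
      pv_contains_tokens_eq_pvHit "B1" (by decide) ps, pv_contains_tokens_eq_pvHit "B2" (by decide) ps,
      pv_contains_tokens_eq_pvHit "AR0" (by decide) ps, pv_contains_tokens_eq_pvHit "AR1" (by decide) ps,
      pv_contains_tokens_eq_pvHit "AR2" (by decide) ps, pv_contains_tokens_eq_pvHit "EY0" (by decide) ps,
      pv_contains_tokens_eq_pvHit "EY1" (by decide) ps, pv_contains_tokens_eq_pvHit "EY2" (by decide) ps,
      pv_contains_tokens_eq_pvHit "DL0" (by decide) ps, pv_contains_tokens_eq_pvHit "DL1" (by decide) ps,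
      pv_contains_tokens_eq_pvHit "DL2" (by decide) ps, pv_contains_tokens_eq_pvHit "R0" (by decide) ps,
      pv_contains_tokens_eq_pvHit "R1" (by decide) ps, pv_contains_tokens_eq_pvHit "R2" (by decide) ps]
  simp only [hd0, pv_getD_mk_false, Bool.false_or]
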